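-- pv_equiv track=rewrite | github.com/xuychen/Leetcode | miscellaneous/funWithVowel.py | helper
-- ===== SOURCE A (Python) =====
-- vowels = ['a', 'e', 'i', 'o', 'u']
--
-- def is_valid(sublist):
--     for vowel in vowels:
--         if vowel not in  sublist:
--             return False
--
-- def helper(s, sublist, index):
--     if index == len(s):
--         if is_valid(sublist):
--             return sublist
--         else:
--             return []
--     else:
--         if len(sublist) == 0:
--             if s[index] != 'a':
--                 return helper(s, sublist, index+1)
--             else:
--                 return helper(s, sublist + [s[index]], index+1)
--         elif sublist[-1] == s[index]:
--             return helper(s, sublist + [s[index]], index+1)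
-- ===== SOURCE B (Python) =====
-- vowels = ['a', 'e', 'i', 'o', 'u']
--
-- def is_valid(sublist):
--     for vowel in vowels:
--         if vowel not in  sublist:
--             return False
--
-- def helper(s, sublist, index):
--     n = len(s)
--     last = sublist[-1] if sublist else None
--     acc = list(sublist)
--     i = index
--     while i != n:
--         c = s[i]
--         if last is None:
--             if c == 'a':
--                 last = c
--                 acc.append(c)
--         elif last == c:
--             acc.append(c)
--         else:
--             return None
--         i += 1
--     return acc if is_valid(acc) else []
-- ===== Notes on version B (the rewrite author's own statement) =====
-- stated objective: simpler
-- what changed: Replaced the recursive descent (which rebuilds sublist + [c] at each call) with a single iterative while-loop that tracks the last matched character in an O(1) variable and appends to one local list; is_valid is kept byte-for-byte.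
import Mathlib
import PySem

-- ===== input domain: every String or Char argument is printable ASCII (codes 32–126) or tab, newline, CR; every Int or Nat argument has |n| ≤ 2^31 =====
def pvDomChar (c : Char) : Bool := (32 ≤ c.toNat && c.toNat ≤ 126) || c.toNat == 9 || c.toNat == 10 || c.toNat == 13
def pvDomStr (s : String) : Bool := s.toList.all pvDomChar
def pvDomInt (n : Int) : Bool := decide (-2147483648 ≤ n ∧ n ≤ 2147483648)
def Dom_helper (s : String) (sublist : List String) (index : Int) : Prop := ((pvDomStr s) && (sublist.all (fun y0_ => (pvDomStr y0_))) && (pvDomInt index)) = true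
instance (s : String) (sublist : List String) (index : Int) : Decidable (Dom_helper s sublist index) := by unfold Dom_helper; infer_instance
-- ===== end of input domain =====

-- B replaces A's recursion (which rebuilds sublist + [c] at every call) by one while-loop with
-- an O(1) last-character variable and a single local accumulator; is_valid is kept verbatim.
-- Both ports use a structural fuel counter (len(s) - index).toNat, exactly the number of
-- remaining loop steps, so they compute by kernel reduction; this changes no behaviour.

-- ===== PORT A =====
-- vowels = ['a', 'e', 'i', 'o', 'u']
def pvVowels : List String := ["a", "e", "i", "o", "u"]

-- is_valid: returns False if some vowel is missing, otherwise falls through (returns None)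
def is_valid_go (sublist : List String) : List String → Option Bool
  | [] => none
  | v :: vs => if ¬ (v ∈ sublist) then some false else is_valid_go sublist vs

def is_valid (sublist : List String) : Option Bool := is_valid_go sublist pvVowels

-- Python truthiness of is_valid's result (False and None are both falsy)
def pvTruthy (o : Option Bool) : Bool := o.getD false

def helperGo (s : String) : List String → Int → Nat → Option (List String)
  | sublist, index, fuel =>
    if index = PySem.Str.len s then
      if pvTruthy (is_valid sublist) then some sublist else some []
    else
      match fuel with
      | 0 => none        -- only reachable when index > len(s): Python raises IndexError there
      | fuel + 1 =>
        match PySem.Str.pyGet? s index with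
        | none => none   -- Python raises IndexError here; excluded by Pre_helper
        | some c =>
          if sublist.length = 0 then
            if String.ofList [c] ≠ "a" then helperGo s sublist (index + 1) fuel
            else helperGo s (sublist ++ [String.ofList [c]]) (index + 1) fuel
          else
            match PySem.List.pyGet? sublist (-1) with
            | some lastv =>
              if lastv = String.ofList [c] then
                helperGo s (sublist ++ [String.ofList [c]]) (index + 1) fuel
              else none  -- elif chain falls through: Python returns None
            | none => none  -- unreachable: sublist is nonempty

def helper (s : String) (sublist : List String) (index : Int) : Option (List String) :=
  helperGo s sublist index (PySem.Str.len s - index).toNat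

-- ===== PORT B =====
-- the while-loop of Source B: state = (last, acc, i); none = the early `return None`
def helper_alt_loop (s : String) : Option String → List String → Int → Nat → Option (List String)
  | last, acc, i, fuel =>
    if i = PySem.Str.len s then some acc
    else
      match fuel with
      | 0 => none        -- only reachable when i > len(s): Python raises IndexError there
      | fuel + 1 =>
        match PySem.Str.pyGet? s i with
        | none => none   -- Python raises IndexError here; excluded by Pre_helper
        | some c =>
          match last with
          | none =>
            if String.ofList [c] = "a" then
              helper_alt_loop s (some (String.ofList [c])) (acc ++ [String.ofList [c]]) (i + 1) fuel
            else helper_alt_loop s none acc (i + 1) fuel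
          | some l =>
            if l = String.ofList [c] then
              helper_alt_loop s (some l) (acc ++ [String.ofList [c]]) (i + 1) fuel
            else none

def helper_alt (s : String) (sublist : List String) (index : Int) : Option (List String) :=
  let last : Option String := if sublist = [] then none else PySem.List.pyGet? sublist (-1)
  match helper_alt_loop s last sublist index (PySem.Str.len s - index).toNat with
  | none => none
  | some acc => if pvTruthy (is_valid acc) then some acc else some []

-- ===== PRECONDITION & SPEC =====
-- Pre_: exactly the inputs where Python A returns (outside it, s[index] raises IndexError)
def Pre_helper (s : String) (sublist : List String) (index : Int) : Prop :=
  -(PySem.Str.len s) ≤ index ∧ index ≤ PySem.Str.len s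
instance (s : String) (sublist : List String) (index : Int) : Decidable (Pre_helper s sublist index) := by unfold Pre_helper; infer_instance
def pvWitness_helper : String × List String × Int := ("", [], 0)

def Spec_helper (s : String) (sublist : List String) (index : Int) (out : Option (List String)) : Prop := out = helper_alt s sublist index
instance (s : String) (sublist : List String) (index : Int) (out : Option (List String)) : Decidable (Spec_helper s sublist index out) := by unfold Spec_helper; infer_instance

-- ===== CLAIM (what is proved, stated in full; the proofs are below) =====
def Claim_equal_helper : Prop := ∀ (s : String) (sublist : List String) (index : Int), Dom_helper s sublist index → Pre_helper s sublist index → Spec_helper s sublist index (helper s sublist index)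

-- ===== LEMMAS AND PROOFS =====

def pvPost (o : Option (List String)) : Option (List String) :=
  match o with
  | none => none
  | some r => if pvTruthy (is_valid r) then some r else some []

theorem pv_key (s : String) :
    ∀ (fuel : Nat) (acc : List String) (i : Int),
      helperGo s acc i fuel =
        pvPost (helper_alt_loop s (if acc = [] then none else acc.getLast?) acc i fuel) := by
  intro fuel
  induction fuel with
  | zero =>
    intro acc i
    rw [helperGo, helper_alt_loop]
    by_cases hi : i = PySem.Str.len s
    · simp [hi, pvPost]
    · rw [if_neg hi, if_neg hi]
      rfl
  | succ n ih =>
    intro acc i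
    rw [helperGo, helper_alt_loop]
    by_cases hi : i = PySem.Str.len s
    · simp [hi, pvPost]
    · simp only [hi, if_false]
      cases hg : PySem.Str.pyGet? s i with
      | none => simp [pvPost]
      | some c =>
        cases acc with
        | nil =>
          simp only [List.length_nil, if_true, List.nil_append]
          by_cases ha : String.ofList [c] = "a"
          · simp only [ha, ne_eq, not_true_eq_false, if_false, if_true]
            have := ih ["a"] (i + 1)
            simpa [ha] using this
          · simp only [ha, ne_eq, not_false_eq_true, if_true, if_false]
            exact ih [] (i + 1)
        | cons x xs =>
          have hne : (x :: xs) ≠ ([] : List String) := by simp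
          simp only [List.length_cons, Nat.succ_ne_zero, if_false, hne, reduceIte]
          rw [PySem.List.pyGet?_neg_one]
          have hsome : (x :: xs).getLast? = some ((x :: xs).getLast hne) := by
            simp [List.getLast?_eq_some_getLast]
          rw [hsome]
          by_cases heq : (x :: xs).getLast hne = String.ofList [c]
          · simp only [heq, if_true, reduceIte]
            have := ih ((x :: xs) ++ [String.ofList [c]]) (i + 1)
            rw [this]
            have hgl : (x :: (xs ++ [String.ofList [c]])).getLast? = some (String.ofList [c]) := by
              rw [← List.cons_append]; exact List.getLast?_concat
            simp [hgl]
          · simp [heq, pvPost]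

theorem pv_main (s : String) (sublist : List String) (index : Int) :
    helper s sublist index = helper_alt s sublist index := by
  have hlast : (if sublist = [] then none else PySem.List.pyGet? sublist (-1))
      = (if sublist = [] then none else sublist.getLast?) := by
    by_cases h : sublist = [] <;> simp [h, PySem.List.pyGet?_neg_one]
  have hk := pv_key s (PySem.Str.len s - index).toNat sublist index
  rw [helper, hk, helper_alt]
  simp only [hlast]
  cases hX : helper_alt_loop s (if sublist = [] then none else sublist.getLast?) sublist index
      (PySem.Str.len s - index).toNat <;> simp [pvPost, hX]

-- ===== VERDICT (by name: the statement is the Claim_ definition above) =====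
theorem helper_spec : Claim_equal_helper := by
  intro s sublist index _ _
  unfold Spec_helper
  exact pv_main s sublist index
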